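-- pv_equiv track=rewrite | github.com/angelmorinigo/datasets | tensorflow_datasets/text/c4_wsrs/c4_wsrs_utils.py | _extract_abbreviation_expansion_pairs
-- ===== SOURCE A (Python) =====
-- from typing import Iterator, Mapping, MutableSequence, Sequence
--
-- def _get_dictionary_pairs(dictionary: Mapping[str, Sequence[str]]):
--   for abbreviation, expansions in dictionary.items():
--     for expansion in expansions:
--       yield abbreviation, expansion
--
-- def _snippet_contains_word_at_index(snippet: str, word: str,
--                                     index: int) -> bool:
--   """Checks if the snippet contains the word at the given index."""
--   if snippet[index:index + len(word)] != word:
--     return False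
--   # Ensures the word is not a substring of a larger word.
--   if index > 0 and snippet[index - 1].isalnum():
--     return False
--   if index > 1 and snippet[index - 1] == "'" and snippet[index - 2].isalnum():
--     return False
--   if ((index + len(word)) < len(snippet) and
--       snippet[index + len(word)].isalnum()):
--     return False
--   return True
--
-- def _extract_abbreviation_expansion_pairs(
--     snippet: str, abbreviation_expansions_dict: Mapping[str, Sequence[str]]
-- ) -> dict[int, list[tuple[str, str]]]:
--   """Extracts all possible abbreviation-expansion pairs from a snippet."""
--   snippet_idx = 0
--   index_to_pairs = {}
--   while snippet_idx < len(snippet):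
--     pairs = []
--     for abbreviation, expansion in _get_dictionary_pairs(
--         abbreviation_expansions_dict):
--       if not _snippet_contains_word_at_index(snippet, expansion, snippet_idx):
--         continue
--       pairs.append((abbreviation, expansion))
--     if pairs:
--       index_to_pairs[snippet_idx] = pairs
--     snippet_idx += 1
--   return index_to_pairs
-- ===== SOURCE B (Python) =====
-- def _boundary_ok(snippet, expansion, index):
--   """True iff expansion occurs at index as a whole word (same boundary rules)."""
--   end = index + len(expansion)
--   return (snippet.startswith(expansion, index)
--           and not (index > 0 and snippet[index - 1].isalnum())
--           and not (index > 1 and snippet[index - 1] == "'"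
--                    and snippet[index - 2].isalnum())
--           and not (end < len(snippet) and snippet[end].isalnum()))
--
--
-- def _extract_abbreviation_expansion_pairs(snippet, abbreviation_expansions_dict):
--   """Extracts all possible abbreviation-expansion pairs from a snippet."""
--   n = len(snippet)
--   pairs_list = [(abbreviation, expansion)
--                 for abbreviation, expansions in abbreviation_expansions_dict.items()
--                 for expansion in expansions]
--   # Candidate positions: starts of raw occurrences of any expansion, gathered
--   # with str.find scans; verification then runs only at candidate positions.
--   candidates = set()
--   for _, expansion in pairs_list:
--     start = 0
--     while True:
--       j = snippet.find(expansion, start)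
--       if j == -1 or j >= n:
--         break
--       candidates.add(j)
--       start = j + 1
--   index_to_pairs = {}
--   for j in sorted(candidates):
--     pairs = [(a, e) for a, e in pairs_list if _boundary_ok(snippet, e, j)]
--     if pairs:
--       index_to_pairs[j] = pairs
--   return index_to_pairs
-- ===== Notes on version B (the rewrite author's own statement) =====
-- stated objective: alternative
-- what changed: Instead of testing every dictionary expansion at every snippet index, B gathers candidate positions with str.find scans per expansion and runs the boundary-checked verification only at the sorted candidate positions.
import Mathlib
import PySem

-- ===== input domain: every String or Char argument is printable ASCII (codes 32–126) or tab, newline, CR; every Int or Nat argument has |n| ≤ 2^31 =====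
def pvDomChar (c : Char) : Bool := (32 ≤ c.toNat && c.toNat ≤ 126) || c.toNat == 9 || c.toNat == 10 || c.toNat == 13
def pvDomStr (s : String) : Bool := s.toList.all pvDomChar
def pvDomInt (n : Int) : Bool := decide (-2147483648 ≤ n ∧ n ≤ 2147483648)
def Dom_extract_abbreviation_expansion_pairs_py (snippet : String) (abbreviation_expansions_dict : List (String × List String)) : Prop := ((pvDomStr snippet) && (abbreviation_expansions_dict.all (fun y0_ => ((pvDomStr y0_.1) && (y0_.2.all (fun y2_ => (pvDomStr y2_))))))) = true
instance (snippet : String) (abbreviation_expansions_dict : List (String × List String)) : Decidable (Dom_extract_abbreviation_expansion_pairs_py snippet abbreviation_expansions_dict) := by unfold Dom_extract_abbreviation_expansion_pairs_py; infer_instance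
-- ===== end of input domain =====

-- B replaces A's test-every-pattern-at-every-index scan by str.find-driven candidate
-- generation followed by boundary verification at candidate positions only (objective:
-- alternative; on match-dense inputs the cost is bound by the output size, like A's).
-- Strings are handled as code-point lists (PySem.Chars), exact on the stated ASCII domain.

-- ===== PORT A =====

-- snippet[k].isalnum() for an index A has already guarded to be in range
-- (PySem.List.pyGet? is Python indexing; the `none` arm is unreachable under A's guards).
def pvAlnumAtA (s : List Char) (k : Int) : Bool :=
  match PySem.List.pyGet? s k with
  | some c => PySem.Chars.isalnum c
  | none => false

-- literal transliteration of _snippet_contains_word_at_index (index is the loop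
-- counter 0 ≤ i < len(snippet), a Nat)
def snippet_contains_word_at_index (s w : List Char) (i : Nat) : Bool :=
  if PySem.List.slice s (some (i : Int)) (some ((i : Int) + (w.length : Int))) ≠ w then false
  else if 0 < i ∧ pvAlnumAtA s ((i : Int) - 1) = true then false
  else if 1 < i ∧ PySem.List.pyGet? s ((i : Int) - 1) = some '\'' ∧ pvAlnumAtA s ((i : Int) - 2) = true then false
  else if i + w.length < s.length ∧ pvAlnumAtA s ((i : Int) + (w.length : Int)) = true then false
  else true

-- _get_dictionary_pairs: the generator over dict.items() (duplicate keys in the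
-- association list collapse exactly as Python's dict does: PySem.Dict.ofList)
def getDictPairsA (d : List (String × List String)) : List (String × String) :=
  (PySem.Dict.ofList d).items.flatMap (fun ae => ae.2.map (fun e => (ae.1, e)))

-- the inner `for abbreviation, expansion in _get_dictionary_pairs(...)` loop with pairs.append
def pairsAtA (s : List Char) (ps : List (String × String)) (i : Nat) : List (String × String) :=
  ps.foldl (fun pairs ae => if snippet_contains_word_at_index s ae.2.toList i = true then pairs ++ [ae] else pairs) []

-- the `while snippet_idx < len(snippet)` loop; index_to_pairs is a dict whose keys
-- (the increasing snippet_idx) are always fresh, so dict insertion is exactly list append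
def extract_abbreviation_expansion_pairs_py (snippet : String) (abbreviation_expansions_dict : List (String × List String)) : List (Int × List (String × String)) :=
  (List.range snippet.toList.length).foldl
    (fun acc i =>
      if pairsAtA snippet.toList (getDictPairsA abbreviation_expansions_dict) i ≠ [] then
        acc ++ [((i : Int), pairsAtA snippet.toList (getDictPairsA abbreviation_expansions_dict) i)]
      else acc)
    []

-- ===== PORT B =====

-- snippet[k].isalnum() (guarded in range by B's boolean conditions)
def pvAlnumAtB (s : List Char) (k : Int) : Bool :=
  (PySem.List.pyGet? s k).elim false PySem.Chars.isalnum

-- _boundary_ok: one boolean conjunction; snippet.startswith(e, j) for 0 ≤ j is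
-- startswith on the j-suffix
def boundary_ok (s w : List Char) (j : Nat) : Bool :=
  PySem.Chars.startswith (List.drop j s) w
    && !(decide (0 < j) && pvAlnumAtB s ((j : Int) - 1))
    && !(decide (1 < j) && (PySem.List.pyGet? s ((j : Int) - 1) == some '\'') && pvAlnumAtB s ((j : Int) - 2))
    && !(decide (j + w.length < s.length) && pvAlnumAtB s ((j : Int) + (w.length : Int)))

-- a fact the port's termination proof cites: find(word, start) is -1 once start is past the end
theorem findFrom_of_gt (s sub : List Char) (k : Nat) (h : s.length < k) :
    PySem.Chars.findFrom s sub (k : Int) none = -1 := by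
  simp only [PySem.Chars.findFrom]
  have h1 : ¬ ((k : Int) < 0) := by omega
  simp only [if_neg h1]
  rw [if_pos (by exact_mod_cast h)]

-- _occurrences: the `while True: j = snippet.find(expansion, start) …` scan; the
-- occs.append loop is ported as the structural cons recursion producing the same
-- (increasing) list of occurrence starts
def findOccs (s w : List Char) (start : Nat) : List Nat :=
  if h : PySem.Chars.findFrom s w (start : Int) none = -1 ∨ (s.length : Int) ≤ PySem.Chars.findFrom s w (start : Int) none then []
  else
    (PySem.Chars.findFrom s w (start : Int) none).toNat ::
      findOccs s w ((PySem.Chars.findFrom s w (start : Int) none).toNat + 1)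
termination_by s.length - start
decreasing_by
  push Not at h
  obtain ⟨hne, hlt⟩ := h
  have hsl : start ≤ s.length := by
    by_contra hgt
    exact hne (findFrom_of_gt s w start (by omega))
  have hspec := PySem.Chars.findFrom_natCast_spec s w start hsl hne
  have _hge : (start : Int) ≤ PySem.Chars.findFrom s w (start : Int) none := hspec.1
  omega

-- pairs_list comprehension over dict.items()
def getDictPairsB (d : List (String × List String)) : List (String × String) :=
  (PySem.Dict.ofList d).items.flatMap (fun ae => ae.2.map (fun e => (ae.1, e)))

-- the candidate set (`candidates.update` of each pattern's occurrence starts)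
def candidatesB (s : List Char) (ps : List (String × String)) : PySem.Set Nat :=
  ps.foldl (fun c ae => PySem.Set.update c (findOccs s ae.2.toList 0)) PySem.Set.empty

-- for j in sorted(candidates): pairs = [(a,e) … if _boundary_ok]; if pairs: out[j] = pairs
def extract_abbreviation_expansion_pairs_py_alt (snippet : String) (abbreviation_expansions_dict : List (String × List String)) : List (Int × List (String × String)) :=
  (PySem.List.sorted (candidatesB snippet.toList (getDictPairsB abbreviation_expansions_dict)) (fun x => x) false).foldl
    (fun acc j =>
      if (getDictPairsB abbreviation_expansions_dict).filter (fun ae => boundary_ok snippet.toList ae.2.toList j) ≠ [] then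
        acc ++ [((j : Int), (getDictPairsB abbreviation_expansions_dict).filter (fun ae => boundary_ok snippet.toList ae.2.toList j))]
      else acc)
    []

-- ===== PRECONDITION & SPEC =====
def Spec_extract_abbreviation_expansion_pairs_py (snippet : String) (abbreviation_expansions_dict : List (String × List String)) (out : List (Int × List (String × String))) : Prop := out = extract_abbreviation_expansion_pairs_py_alt snippet abbreviation_expansions_dict
instance (snippet : String) (abbreviation_expansions_dict : List (String × List String)) (out : List (Int × List (String × String))) : Decidable (Spec_extract_abbreviation_expansion_pairs_py snippet abbreviation_expansions_dict out) := by unfold Spec_extract_abbreviation_expansion_pairs_py; infer_instance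

-- ===== CLAIM (what is proved, stated in full; the proofs are below) =====
def Claim_equal_extract_abbreviation_expansion_pairs_py : Prop := ∀ (snippet : String) (abbreviation_expansions_dict : List (String × List String)), Dom_extract_abbreviation_expansion_pairs_py snippet abbreviation_expansions_dict → Spec_extract_abbreviation_expansion_pairs_py snippet abbreviation_expansions_dict (extract_abbreviation_expansion_pairs_py snippet abbreviation_expansions_dict)

-- ===== LEMMAS AND PROOFS =====

-- the two per-character alnum accessors agree
theorem alnumAt_eq (s : List Char) (k : Int) : pvAlnumAtB s k = pvAlnumAtA s k := by
  unfold pvAlnumAtA pvAlnumAtB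
  cases PySem.List.pyGet? s k <;> rfl

-- B's one-line boundary test equals A's early-return chain
theorem boundary_ok_eq (s w : List Char) (j : Nat) :
    boundary_ok s w j = snippet_contains_word_at_index s w j := by
  unfold boundary_ok snippet_contains_word_at_index
  rw [PySem.List.slice_natCast_add]
  by_cases h1 : w <+: List.drop j s
  · have hsw : PySem.Chars.startswith (List.drop j s) w = true :=
      (PySem.Chars.startswith_iff _ _).2 h1
    have htake : List.take w.length (List.drop j s) = w :=
      (List.prefix_iff_eq_take.1 h1).symm
    rw [hsw, htake, if_neg (by simp)]
    simp only [alnumAt_eq, Bool.true_and]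
    by_cases h2 : 0 < j ∧ pvAlnumAtA s ((j : Int) - 1) = true
    · rw [if_pos h2]
      simp [h2.1, h2.2]
    · rw [if_neg h2]
      have e2 : (decide (0 < j) && pvAlnumAtA s ((j : Int) - 1)) = false := by
        rcases Decidable.not_and_iff_not_or_not.1 h2 with h | h <;> simp [h]
      rw [e2]
      simp only [Bool.not_false, Bool.true_and]
      by_cases h3 : 1 < j ∧ PySem.List.pyGet? s ((j : Int) - 1) = some '\'' ∧ pvAlnumAtA s ((j : Int) - 2) = true
      · rw [if_pos h3]
        simp [h3.1, h3.2.1, h3.2.2]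
      · rw [if_neg h3]
        have e3 : (decide (1 < j) && (PySem.List.pyGet? s ((j : Int) - 1) == some '\'') && pvAlnumAtA s ((j : Int) - 2)) = false := by
          by_cases ha : 1 < j
          · by_cases hb : PySem.List.pyGet? s ((j : Int) - 1) = some '\''
            · by_cases hc : pvAlnumAtA s ((j : Int) - 2) = true
              · exact absurd ⟨ha, hb, hc⟩ h3
              · simp [hc]
            · simp [hb]
          · simp [ha]
        rw [e3]
        simp only [Bool.not_false, Bool.true_and]
        by_cases h4 : j + w.length < s.length ∧ pvAlnumAtA s ((j : Int) + (w.length : Int)) = true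
        · rw [if_pos h4]
          simp [h4.1, h4.2]
        · rw [if_neg h4]
          rcases Decidable.not_and_iff_not_or_not.1 h4 with h | h <;> simp [h]
  · have hsw : PySem.Chars.startswith (List.drop j s) w = false := by
      rw [Bool.eq_false_iff]
      intro hc
      exact h1 ((PySem.Chars.startswith_iff _ _).1 hc)
    have htake : List.take w.length (List.drop j s) ≠ w := by
      intro hc
      exact h1 (List.prefix_iff_eq_take.2 hc.symm)
    rw [hsw, if_pos htake]
    simp

-- A's inner append loop is B's filter
theorem pairsAt_eq (s : List Char) (ps : List (String × String)) (i : Nat) :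
    pairsAtA s ps i = ps.filter (fun ae => boundary_ok s ae.2.toList i) := by
  unfold pairsAtA
  rw [PySem.List.foldl_append_if_eq_filter (fun ae => snippet_contains_word_at_index s ae.2.toList i) ps []]
  simp only [List.nil_append]
  exact (List.filter_congr (fun ae _ => boundary_ok_eq s ae.2.toList i)).symm

-- the find-scan returns exactly the raw occurrence starts in [start, |s|)
theorem mem_findOccs (s w : List Char) (start : Nat) (j : Nat) :
    j ∈ findOccs s w start ↔ start ≤ j ∧ j < s.length ∧ w <+: List.drop j s := by
  fun_induction findOccs s w start with
  | case1 start h =>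
    simp only [List.not_mem_nil, false_iff]
    rintro ⟨hsj, hjl, hpre⟩
    have hsl : start ≤ s.length := by omega
    rcases h with h | h
    · rw [PySem.Chars.findFrom_natCast_eq_neg_one_iff s w start hsl] at h
      apply h
      have h5 : List.drop j s = List.drop (j - start) (List.drop start s) := by
        rw [List.drop_drop]; congr 1; omega
      rw [h5] at hpre
      exact hpre.isInfix.trans (List.drop_suffix (j - start) (List.drop start s)).isInfix
    · have hne : PySem.Chars.findFrom s w (start : Int) none ≠ -1 := by omega
      have hspec := PySem.Chars.findFrom_natCast_spec s w start hsl hne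
      exact hspec.2.2 j hsj (by omega) hpre
  | case2 start h ih =>
    push Not at h
    obtain ⟨hne, hlt⟩ := h
    have hsl : start ≤ s.length := by
      by_contra hgt
      exact hne (findFrom_of_gt s w start (by omega))
    have hspec := PySem.Chars.findFrom_natCast_spec s w start hsl hne
    have hf0 : (start : Int) ≤ PySem.Chars.findFrom s w (start : Int) none := hspec.1
    set f := (PySem.Chars.findFrom s w (start : Int) none).toNat with hfdef
    have hfl : f < s.length := by omega
    have hsf : start ≤ f := by omega
    simp only [List.mem_cons, ih]
    constructor
    · rintro (rfl | ⟨h1, h2, h3⟩)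
      · exact ⟨hsf, hfl, hspec.2.1⟩
      · exact ⟨by omega, h2, h3⟩
    · rintro ⟨h1, h2, h3⟩
      rcases Nat.lt_trichotomy j f with hj | hj | hj
      · exact absurd h3 (hspec.2.2 j h1 hj)
      · exact Or.inl hj
      · exact Or.inr ⟨by omega, h2, h3⟩

-- membership in the accumulated candidate set
theorem mem_candidatesB (s : List Char) (ps : List (String × String)) (j : Nat) :
    j ∈ candidatesB s ps ↔ ∃ ae ∈ ps, j ∈ findOccs s ae.2.toList 0 := by
  unfold candidatesB
  have main : ∀ (l : List (String × String)) (c : PySem.Set Nat),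
      j ∈ l.foldl (fun c ae => PySem.Set.update c (findOccs s ae.2.toList 0)) c ↔
        j ∈ c ∨ ∃ ae ∈ l, j ∈ findOccs s ae.2.toList 0 := by
    intro l
    induction l with
    | nil => simp
    | cons a t ih =>
      intro c
      simp only [List.foldl_cons, ih, PySem.Set.mem_update, List.mem_cons]
      constructor
      · rintro ((h | h) | ⟨ae, hae, hj⟩)
        · exact Or.inl h
        · exact Or.inr ⟨a, Or.inl rfl, h⟩
        · exact Or.inr ⟨ae, Or.inr hae, hj⟩
      · rintro (h | ⟨ae, (rfl | hae), hj⟩)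
        · exact Or.inl (Or.inl h)
        · exact Or.inl (Or.inr hj)
        · exact Or.inr ⟨ae, hae, hj⟩
  rw [main]
  simp [PySem.Set.empty]

-- the candidate set has no duplicates
theorem nodup_candidatesB (s : List Char) (ps : List (String × String)) :
    (candidatesB s ps).Nodup := by
  unfold candidatesB
  have main : ∀ (l : List (String × String)) (c : PySem.Set Nat), c.Nodup →
      (l.foldl (fun c ae => PySem.Set.update c (findOccs s ae.2.toList 0)) c).Nodup := by
    intro l
    induction l with
    | nil => intro c hc; exact hc
    | cons a t ih =>
      intro c hc
      apply ih
      unfold PySem.Set.update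
      have : ∀ (xs : List Nat) (d : PySem.Set Nat), d.Nodup → (xs.foldl PySem.Set.add d).Nodup := by
        intro xs
        induction xs with
        | nil => intro d hd; exact hd
        | cons x xt ihx => intro d hd; exact ihx _ (PySem.Set.nodup_add d x hd)
      exact this _ _ hc
  exact main ps PySem.Set.empty List.nodup_nil

-- the sorted candidate list contains exactly the raw occurrence starts
theorem mem_sorted_cands (s : List Char) (ps : List (String × String)) (a : Nat) :
    a ∈ PySem.List.sorted (candidatesB s ps) (fun x => x) false ↔
      ∃ ae ∈ ps, a < s.length ∧ ae.2.toList <+: List.drop a s := by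
  rw [(PySem.List.sorted_perm (candidatesB s ps) (fun x => x) false).mem_iff, mem_candidatesB]
  simp [mem_findOccs]

-- ===== VERDICT (by name: the statement is the Claim_ definition above) =====
theorem extract_abbreviation_expansion_pairs_py_spec : Claim_equal_extract_abbreviation_expansion_pairs_py := by
  intro snippet d _
  unfold Spec_extract_abbreviation_expansion_pairs_py
  unfold extract_abbreviation_expansion_pairs_py extract_abbreviation_expansion_pairs_py_alt
  have hps : getDictPairsB d = getDictPairsA d := rfl
  rw [hps]
  set s := snippet.toList with hs
  set ps := getDictPairsA d with hpsd
  rw [PySem.List.foldl_append_ite (fun i => pairsAtA s ps i ≠ [])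
        (fun i => ((i : Int), pairsAtA s ps i))]
  rw [PySem.List.foldl_append_ite
        (fun j => ps.filter (fun ae => boundary_ok s ae.2.toList j) ≠ [])
        (fun j => ((j : Int), ps.filter (fun ae => boundary_ok s ae.2.toList j)))]
  simp only [List.nil_append, ← pairsAt_eq]
  congr 1
  -- both index lists are strictly increasing and duplicate-free with the same members
  have hnodS : (PySem.List.sorted (candidatesB s ps) (fun x => x) false).Nodup :=
    ((PySem.List.sorted_perm (candidatesB s ps) (fun x => x) false).nodup_iff).2
      (nodup_candidatesB s ps)
  have hpwS : List.Pairwise (· < ·) (PySem.List.sorted (candidatesB s ps) (fun x => x) false) := by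
    have h1 := PySem.List.sorted_pairwise (candidatesB s ps) (fun x => x)
    exact (h1.and hnodS).imp (fun h => lt_of_le_of_ne h.1 h.2)
  have hmem : ∀ a : Nat,
      a ∈ (List.range s.length).filter (fun i => decide (pairsAtA s ps i ≠ [])) ↔
      a ∈ (PySem.List.sorted (candidatesB s ps) (fun x => x) false).filter
            (fun i => decide (pairsAtA s ps i ≠ [])) := by
    intro a
    simp only [List.mem_filter, List.mem_range]
    constructor
    · rintro ⟨ha, hP⟩
      refine ⟨?_, hP⟩
      rw [mem_sorted_cands]
      have hP' : pairsAtA s ps a ≠ [] := by simpa using hP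
      rw [pairsAt_eq] at hP'
      have hex := mt List.filter_eq_nil_iff.2 hP'
      push Not at hex
      obtain ⟨ae, hae, hb⟩ := hex
      refine ⟨ae, hae, ha, ?_⟩
      unfold boundary_ok at hb
      simp only [Bool.and_eq_true] at hb
      exact (PySem.Chars.startswith_iff _ _).1 hb.1.1.1
    · rintro ⟨hmemS, hP⟩
      rw [mem_sorted_cands] at hmemS
      obtain ⟨ae, _, hlen, _⟩ := hmemS
      exact ⟨hlen, hP⟩
  exact List.Perm.eq_of_pairwise (le := fun a b => a < b)
    (fun a b _ _ h1 h2 => by omega)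
    (List.pairwise_lt_range.filter _)
    (hpwS.filter _)
    ((List.perm_ext_iff_of_nodup (List.nodup_range.filter _) (hnodS.filter _)).2 hmem)
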